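-- pv_equiv track=rewrite | github.com/tezeladata/Group-zero-and-extra | Day 80/Classwork/classwork.py | work_on_strings
-- ===== SOURCE A (Python) =====
-- def work_on_strings(a,b):
--     list1 = list(a)
--     list2 = list(b)
--
-- #   part1
--     for i in range(len(list1)):
--         for x in range(len(list2)):
--             if list1[i].upper() == list2[x] or list1[i].lower() == list2[x]:
--                 list2[x] = list2[x].swapcase()
--
-- #   part2
--     for x in range(len(list2)):
--         for i in range(len(list1)):
--             if list2[x].upper() == list1[i] or list2[x].lower() == list1[i]:
--                 list1[i] = list1[i].swapcase()
--
--     return "".join(list1 + list2)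
-- ===== SOURCE B (Python) =====
-- def work_on_strings(a, b):
--     ca = {}
--     for ch in a:
--         k = ch.lower()
--         ca[k] = ca.get(k, 0) + 1
--     cb = {}
--     for ch in b:
--         k = ch.lower()
--         cb[k] = cb.get(k, 0) + 1
--     out = []
--     for ch in a:
--         if ch.isalpha() and cb.get(ch.lower(), 0) % 2 == 1:
--             out.append(ch.swapcase())
--         else:
--             out.append(ch)
--     for ch in b:
--         if ch.isalpha() and ca.get(ch.lower(), 0) % 2 == 1:
--             out.append(ch.swapcase())
--         else:
--             out.append(ch)
--     return "".join(out)
-- ===== Notes on version B (the rewrite author's own statement) =====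
-- stated objective: faster
-- what changed: Replaces the two quadratic nested scans (repeatedly swapcasing on every cross-match) by one pass that builds a case-folded count dict per string and toggles each letter's case exactly when the number of case-insensitive matches in the other string is odd.
import Mathlib
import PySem

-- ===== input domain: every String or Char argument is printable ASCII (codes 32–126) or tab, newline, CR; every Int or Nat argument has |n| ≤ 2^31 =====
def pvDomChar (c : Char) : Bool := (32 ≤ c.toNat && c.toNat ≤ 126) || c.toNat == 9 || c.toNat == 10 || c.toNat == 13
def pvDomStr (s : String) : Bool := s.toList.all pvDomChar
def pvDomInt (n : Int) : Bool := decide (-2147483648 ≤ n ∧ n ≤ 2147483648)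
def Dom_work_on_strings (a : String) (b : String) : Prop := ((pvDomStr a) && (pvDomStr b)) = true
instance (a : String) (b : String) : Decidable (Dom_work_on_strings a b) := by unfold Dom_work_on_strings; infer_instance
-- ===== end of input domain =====

-- B replaces A's two O(n*m) nested match-and-swapcase scans by case-folded count
-- dicts and an odd-parity toggle per character (O(n+m)); return values are equal.

-- ===== PORT A =====
-- str.swapcase for one char (exact on the ASCII domain)
def pvSwapChar (c : Char) : Char :=
  if PySem.Chars.isupper c then PySem.Chars.lowerChar c
  else if PySem.Chars.islower c then PySem.Chars.upperChar c
  else c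

-- A's condition  src.upper() == tgt or src.lower() == tgt
def pvMatch (c d : Char) : Bool :=
  PySem.Chars.upperChar c == d || PySem.Chars.lowerChar c == d

-- inner loop of either part: sweep all positions of t, toggling matches of c
def pvSweep (c : Char) (t : List Char) : List Char :=
  (List.range t.length).foldl
    (fun t x =>
      let d := t.getD x ' '
      if pvMatch c d then t.set x (pvSwapChar d) else t) t

-- one part: for each char of src (read from the unmutated list), sweep tgt
def pvPass (src tgt : List Char) : List Char :=
  src.foldl (fun t c => pvSweep c t) tgt

def work_on_strings (a : String) (b : String) : String :=
  let list1 := a.toList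
  let list2 := b.toList
  let list2' := pvPass list1 list2        -- part1 mutates list2
  let list1' := pvPass list2' list1       -- part2 mutates list1, reading mutated list2
  String.mk (list1' ++ list2')

-- ===== PORT B =====
-- dict of counts keyed by ch.lower()  (ca[k] = ca.get(k,0) + 1)
def pvCounter (s : List Char) : PySem.Dict Char Int :=
  s.foldl
    (fun d ch =>
      let k := PySem.Chars.lowerChar ch
      d.insert k (d.getD k 0 + 1)) PySem.Dict.empty

-- ch.swapcase() if ch.isalpha() and cnt.get(ch.lower(),0) % 2 == 1 else ch
def pvToggleOdd (cnt : PySem.Dict Char Int) (ch : Char) : Char :=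
  if PySem.Chars.isalpha ch && (cnt.getD (PySem.Chars.lowerChar ch) 0) % 2 == 1
  then pvSwapChar ch else ch

def work_on_strings_alt (a : String) (b : String) : String :=
  let ca := pvCounter a.toList
  let cb := pvCounter b.toList
  String.mk (a.toList.map (pvToggleOdd cb) ++ b.toList.map (pvToggleOdd ca))

-- ===== PRECONDITION & SPEC =====
def Spec_work_on_strings (a : String) (b : String) (out : String) : Prop := out = work_on_strings_alt a b
instance (a : String) (b : String) (out : String) : Decidable (Spec_work_on_strings a b out) := by unfold Spec_work_on_strings; infer_instance

-- ===== CLAIM (what is proved, stated in full; the proofs are below) =====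
def Claim_equal_work_on_strings : Prop := ∀ (a : String) (b : String), Dom_work_on_strings a b → Spec_work_on_strings a b (work_on_strings a b)

-- ===== LEMMAS AND PROOFS =====

-- characters: everything in terms of code points
theorem pv_toNat_inj {c d : Char} : c = d ↔ c.toNat = d.toNat :=
  ⟨fun h => h ▸ rfl, fun h => Char.ext (UInt32.toNat_inj.mp h)⟩

theorem pv_ofNat_toNat {n : Nat} (h : n < 55296) : (Char.ofNat n).toNat = n := by
  rw [Char.toNat_ofNat, if_pos (Or.inl h)]

theorem pv_le_iff {c d : Char} : (c ≤ d) ↔ c.toNat ≤ d.toNat := by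
  rw [Char.le_def]; exact UInt32.le_iff_toNat_le

theorem pv_isupper_eq (c : Char) :
    PySem.Chars.isupper c = (65 ≤ c.toNat && c.toNat ≤ 90) := by
  simp only [PySem.Chars.isupper]
  have h1 : ('A' ≤ c) ↔ 65 ≤ c.toNat := pv_le_iff
  have h2 : (c ≤ 'Z') ↔ c.toNat ≤ 90 := pv_le_iff
  simp [h1, h2]

theorem pv_islower_eq (c : Char) :
    PySem.Chars.islower c = (97 ≤ c.toNat && c.toNat ≤ 122) := by
  simp only [PySem.Chars.islower]
  have h1 : ('a' ≤ c) ↔ 97 ≤ c.toNat := pv_le_iff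
  have h2 : (c ≤ 'z') ↔ c.toNat ≤ 122 := pv_le_iff
  simp [h1, h2]

theorem pv_upperChar_toNat (c : Char) :
    (PySem.Chars.upperChar c).toNat =
      if 97 ≤ c.toNat ∧ c.toNat ≤ 122 then c.toNat - 32 else c.toNat := by
  simp only [PySem.Chars.upperChar, pv_islower_eq]
  by_cases h : 97 ≤ c.toNat ∧ c.toNat ≤ 122
  · rw [if_pos (by simp [h.1, h.2]), if_pos h, pv_ofNat_toNat (by omega)]
  · rw [if_neg (by simpa using fun h1 h2 => h ⟨h1, h2⟩), if_neg h]

theorem pv_lowerChar_toNat (c : Char) :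
    (PySem.Chars.lowerChar c).toNat =
      if 65 ≤ c.toNat ∧ c.toNat ≤ 90 then c.toNat + 32 else c.toNat := by
  simp only [PySem.Chars.lowerChar, pv_isupper_eq]
  by_cases h : 65 ≤ c.toNat ∧ c.toNat ≤ 90
  · rw [if_pos (by simp [h.1, h.2]), if_pos h, pv_ofNat_toNat (by omega)]
  · rw [if_neg (by simpa using fun h1 h2 => h ⟨h1, h2⟩), if_neg h]

theorem pv_swapChar_toNat (c : Char) :
    (pvSwapChar c).toNat =
      if 65 ≤ c.toNat ∧ c.toNat ≤ 90 then c.toNat + 32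
      else if 97 ≤ c.toNat ∧ c.toNat ≤ 122 then c.toNat - 32
      else c.toNat := by
  rw [pvSwapChar]
  by_cases hu : 65 ≤ c.toNat ∧ c.toNat ≤ 90
  · have h1 : PySem.Chars.isupper c = true := by rw [pv_isupper_eq]; simp [hu.1, hu.2]
    simp [h1, pv_lowerChar_toNat, hu]
  · have h1 : PySem.Chars.isupper c = false := by
      rw [pv_isupper_eq]; simpa using fun h1 h2 => hu ⟨h1, h2⟩
    by_cases hl : 97 ≤ c.toNat ∧ c.toNat ≤ 122
    · have h2 : PySem.Chars.islower c = true := by rw [pv_islower_eq]; simp [hl.1, hl.2]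
      simp [h1, h2, pv_upperChar_toNat, hl, hu]
    · have h2 : PySem.Chars.islower c = false := by
        rw [pv_islower_eq]; simpa using fun ha hb => hl ⟨ha, hb⟩
      simp [h1, h2, hl, hu]

theorem pv_beq_toNat (c d : Char) : (c == d) = (c.toNat == d.toNat) := by
  by_cases h : c = d
  · simp [h]
  · have hn : c.toNat ≠ d.toNat := fun hh => h (pv_toNat_inj.mpr hh)
    simp [h, hn]

theorem pv_match_toNat (c d : Char) :
    pvMatch c d = ((PySem.Chars.upperChar c).toNat == d.toNat
                || (PySem.Chars.lowerChar c).toNat == d.toNat) := by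
  simp only [pvMatch, pv_beq_toNat]

theorem pv_swap_swap (d : Char) : pvSwapChar (pvSwapChar d) = d := by
  rw [pv_toNat_inj]
  simp only [pv_swapChar_toNat]
  split_ifs <;> omega

theorem pv_match_swap_right (c d : Char) : pvMatch c (pvSwapChar d) = pvMatch c d := by
  rw [Bool.eq_iff_iff]
  simp only [pv_match_toNat, pv_swapChar_toNat, pv_upperChar_toNat, pv_lowerChar_toNat,
    Bool.or_eq_true, beq_iff_eq]
  split_ifs <;> omega

theorem pv_match_swap_left (c d : Char) : pvMatch (pvSwapChar c) d = pvMatch c d := by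
  rw [Bool.eq_iff_iff]
  simp only [pv_match_toNat, pv_swapChar_toNat, pv_upperChar_toNat, pv_lowerChar_toNat,
    Bool.or_eq_true, beq_iff_eq]
  split_ifs <;> omega

theorem pv_isalpha_eq (c : Char) :
    PySem.Chars.isalpha c = ((65 ≤ c.toNat && c.toNat ≤ 90) || (97 ≤ c.toNat && c.toNat ≤ 122)) := by
  simp [PySem.Chars.isalpha, pv_isupper_eq, pv_islower_eq]

theorem pv_swap_nonalpha {d : Char} (h : PySem.Chars.isalpha d = false) : pvSwapChar d = d := by
  rw [pv_isalpha_eq] at h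
  simp only [Bool.or_eq_false_iff, Bool.and_eq_false_iff, decide_eq_false_iff_not] at h
  rw [pv_toNat_inj]
  simp only [pv_swapChar_toNat]
  split_ifs <;> omega

theorem pv_match_lower (d : Char) (c : Char) :
    pvMatch c d = (PySem.Chars.lowerChar c == PySem.Chars.lowerChar d) := by
  rw [Bool.eq_iff_iff]
  simp only [pv_match_toNat, pv_beq_toNat, pv_upperChar_toNat, pv_lowerChar_toNat,
    Bool.or_eq_true, beq_iff_eq]
  split_ifs <;> omega

-- the inner sweep is a map over the target
def pvToggle1 (c d : Char) : Char := if pvMatch c d then pvSwapChar d else d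

theorem pv_sweep_aux (c : Char) (suf : List Char) : ∀ (pre : List Char),
    (List.range' pre.length suf.length).foldl
      (fun t x =>
        let d := t.getD x ' '
        if pvMatch c d then t.set x (pvSwapChar d) else t) (pre ++ suf)
    = pre ++ suf.map (pvToggle1 c) := by
  induction suf with
  | nil => intro pre; simp
  | cons d rest ih =>
    intro pre
    rw [List.length_cons, List.range'_succ, List.foldl_cons]
    have hget : (pre ++ d :: rest).getD pre.length ' ' = d := by
      rw [List.getD_append_right _ _ _ _ (Nat.le_refl _)]; simp
    have hset : ∀ v, (pre ++ d :: rest).set pre.length v = (pre ++ [v]) ++ rest := by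
      intro v
      rw [List.set_append, if_neg (by omega)]
      simp
    have hstep :
        (let dd := (pre ++ d :: rest).getD pre.length ' '
         if pvMatch c dd then (pre ++ d :: rest).set pre.length (pvSwapChar dd) else pre ++ d :: rest)
        = (pre ++ [pvToggle1 c d]) ++ rest := by
      simp only [hget, pvToggle1]
      split_ifs with h
      · exact hset _
      · simp
    rw [hstep]
    have hlen : pre.length + 1 = (pre ++ [pvToggle1 c d]).length := by simp
    rw [hlen, ih (pre ++ [pvToggle1 c d])]
    simp

theorem pv_sweep_eq (c : Char) (t : List Char) :
    pvSweep c t = t.map (pvToggle1 c) := by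
  have := pv_sweep_aux c t []
  simpa [pvSweep, List.range_eq_range'] using this

-- one per-character fold equivalent to the whole pass
def pvF (src : List Char) (d : Char) : Char := src.foldl (fun d c => pvToggle1 c d) d

theorem pv_pass_eq (src : List Char) : ∀ tgt, pvPass src tgt = tgt.map (pvF src) := by
  induction src with
  | nil =>
    intro tgt
    simp only [pvPass, List.foldl_nil]
    symm
    have hid : pvF ([] : List Char) = id := funext fun _ => rfl
    rw [hid, List.map_id]
  | cons c src ih =>
    intro tgt
    show pvPass src (pvSweep c tgt) = _
    rw [ih, pv_sweep_eq, List.map_map]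
    rfl

-- parity characterisation of the per-character fold
theorem pv_F_parity (src : List Char) : ∀ d,
    pvF src d = if src.countP (fun c => pvMatch c d) % 2 == 1 then pvSwapChar d else d := by
  induction src with
  | nil => intro d; simp [pvF]
  | cons c src ih =>
    intro d
    show pvF src (pvToggle1 c d) = _
    rw [ih]
    by_cases h : pvMatch c d = true
    · rw [List.countP_cons_of_pos (p := fun x => pvMatch x d) h]
      simp only [pvToggle1, if_pos h, pv_match_swap_right, pv_swap_swap]
      split_ifs with h1 h2 h2 <;> simp only [beq_iff_eq] at * <;> first | rfl | omega
    · rw [List.countP_cons_of_neg (p := fun x => pvMatch x d) h]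
      simp only [pvToggle1, if_neg h]

theorem pv_match_F_left (src : List Char) (c d : Char) :
    pvMatch (pvF src c) d = pvMatch c d := by
  rw [pv_F_parity]
  split_ifs with h
  · exact pv_match_swap_left c d
  · rfl

-- the pass does not change cross-string match counts
theorem pv_count_pass (src tgt : List Char) (d : Char) :
    (pvPass src tgt).countP (fun c => pvMatch c d)
      = tgt.countP (fun c => pvMatch c d) := by
  rw [pv_pass_eq, List.countP_map]
  apply List.countP_congr
  intro c _
  simp [Function.comp, pv_match_F_left]

-- B's counter: case-folded counts
theorem pv_counter_getD_aux (s : List Char) (k : Char) : ∀ (d : PySem.Dict Char Int),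
    (s.foldl (fun d ch =>
        let kk := PySem.Chars.lowerChar ch
        d.insert kk (d.getD kk 0 + 1)) d).getD k 0
      = d.getD k 0 + (s.countP (fun ch => PySem.Chars.lowerChar ch == k) : Int) := by
  induction s with
  | nil => intro d; simp
  | cons ch s ih =>
    intro d
    rw [List.foldl_cons, ih]
    by_cases h : PySem.Chars.lowerChar ch = k
    · rw [List.countP_cons_of_pos (by simp [h])]
      rw [PySem.Dict.getD_insert, if_pos h.symm, h]
      push_cast; ring
    · rw [List.countP_cons_of_neg (by simp [h])]
      rw [PySem.Dict.getD_insert, if_neg (fun hh => h hh.symm)]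

theorem pv_counter_getD (s : List Char) (k : Char) :
    (pvCounter s).getD k 0 = (s.countP (fun ch => PySem.Chars.lowerChar ch == k) : Int) := by
  rw [pvCounter, pv_counter_getD_aux]
  simp [PySem.Dict.empty, PySem.Dict.getD, PySem.Dict.get?]

-- Int vs Nat parity
theorem pv_int_parity (n : Nat) : (((n : Int) % 2 == 1) : Bool) = (n % 2 == 1) := by
  by_cases h : n % 2 = 1
  · have h2 : (n : Int) % 2 = 1 := by omega
    simp [h, h2]
  · have h2 : (n : Int) % 2 ≠ 1 := by omega
    simp [h, h2]

-- per-character agreement of the two formulas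
theorem pv_perchar (s : List Char) (d : Char) :
    (if s.countP (fun c => pvMatch c d) % 2 == 1 then pvSwapChar d else d)
      = pvToggleOdd (pvCounter s) d := by
  rw [pvToggleOdd, pv_counter_getD, pv_int_parity]
  by_cases h : PySem.Chars.isalpha d = true
  · rw [h]
    have hc : s.countP (fun c => pvMatch c d)
        = s.countP (fun c => PySem.Chars.lowerChar c == PySem.Chars.lowerChar d) := by
      apply List.countP_congr; intro c _; rw [pv_match_lower d c]
    rw [hc]
    simp
  · have h' : PySem.Chars.isalpha d = false := by simpa using h
    have hs := pv_swap_nonalpha h'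
    rw [h']
    simp [hs]

theorem pv_side (src tgt : List Char) :
    tgt.map (pvF src) = tgt.map (pvToggleOdd (pvCounter src)) := by
  apply List.map_congr_left
  intro d _
  rw [pv_F_parity, pv_perchar]

-- ===== VERDICT (by name: the statement is the Claim_ definition above) =====
theorem work_on_strings_spec : Claim_equal_work_on_strings := by
  intro a b _
  show String.mk (pvPass (pvPass a.toList b.toList) a.toList ++ pvPass a.toList b.toList)
      = String.mk (a.toList.map (pvToggleOdd (pvCounter b.toList))
          ++ b.toList.map (pvToggleOdd (pvCounter a.toList)))
  have h1 : pvPass (pvPass a.toList b.toList) a.toList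
      = a.toList.map (pvToggleOdd (pvCounter b.toList)) := by
    rw [pv_pass_eq]
    apply List.map_congr_left
    intro d _
    rw [pv_F_parity, pv_count_pass, pv_perchar]
  have h2 : pvPass a.toList b.toList
      = b.toList.map (pvToggleOdd (pvCounter a.toList)) := by
    rw [pv_pass_eq]; exact pv_side a.toList b.toList
  rw [h1, h2]
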